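-- pv_equiv track=rewrite | github.com/jastrzt2/safe-app | app/validate_requests.py | validate_register_inputs
-- ===== SOURCE A (Python) =====
-- import math
-- import string
-- import string
--
-- def is_password_valid(password):
--     if len(password) < 8:
--         return False
--
--     if not any(c in string.ascii_lowercase for c in password):
--         return False
--
--     if not any(c in string.ascii_uppercase for c in password):
--         return False
--
--     if not any(c in string.digits for c in password):
--         return False
--
--     if not any(c in string.punctuation for c in password):
--         return False
--
--     return True
--
-- def validate_password_entropy(password):
--     pool_size = 0
--
--     if any(c in string.ascii_lowercase for c in password):
--         pool_size += len(string.ascii_lowercase)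
--     if any(c in string.ascii_uppercase for c in password):
--         pool_size += len(string.ascii_uppercase)
--     if any(c in string.digits for c in password):
--         pool_size += len(string.digits)
--     if any(c in string.punctuation for c in password):
--         pool_size += len(string.punctuation)
--
--     if pool_size == 0:
--         return "Password is too weak."
--
--     entropy = math.log2(pool_size) * len(password)
--
--     MIN_ENTROPY = 60
--
--     if entropy < MIN_ENTROPY:
--         return "Password is too weak."
--     return None
--
-- def validate_register_inputs(username, password, repeated_password, email):
--     errors = []
--
--     if len(username) > 100:
--         errors.append("Username cannot exceed 100 characters.")
--     if not username.isalnum():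
--         errors.append("Username can only contain letters and digits.")
--
--     if not email:
--         errors.append("Email is required.")
--     if len(email) > 254:
--         errors.append("Email cannot exceed 254 characters.")
--     if '@' not in email or '.' not in email:
--         errors.append("Invalid email format.")
--     if any(c for c in email if c not in string.ascii_letters + string.digits + "@._-"):
--         errors.append("Email contains invalid characters.")
--
--     if password != repeated_password:
--         errors.append("Passwords do not match.")
--     if not is_password_valid(password):
--         errors.append("Password must contain at least one lowercase letter, one uppercase letter, one digit, and one special character.")
--     entropy_error = validate_password_entropy(password)
--     if entropy_error:
--         errors.append(entropy_error)
--     return "\n".join(errors) if errors else None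
-- ===== SOURCE B (Python) =====
-- import math
-- import string
--
-- _ALLOWED_EMAIL = set(string.ascii_letters + string.digits + "@._-")
--
-- def validate_register_inputs(username, password, repeated_password, email):
--     # one pass over the password classifies each char into four flags
--     has_lower = has_upper = has_digit = has_punct = False
--     for c in password:
--         if 'a' <= c <= 'z':
--             has_lower = True
--         elif 'A' <= c <= 'Z':
--             has_upper = True
--         elif '0' <= c <= '9':
--             has_digit = True
--         elif c in string.punctuation:
--             has_punct = True
--     pool_size = ((26 if has_lower else 0) + (26 if has_upper else 0)
--                  + (10 if has_digit else 0) + (32 if has_punct else 0))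
--     n = len(password)
--     checks = [
--         (len(username) > 100, "Username cannot exceed 100 characters."),
--         (not username.isalnum(), "Username can only contain letters and digits."),
--         (not email, "Email is required."),
--         (len(email) > 254, "Email cannot exceed 254 characters."),
--         ('@' not in email or '.' not in email, "Invalid email format."),
--         (any(c not in _ALLOWED_EMAIL for c in email), "Email contains invalid characters."),
--         (password != repeated_password, "Passwords do not match."),
--         (not (n >= 8 and has_lower and has_upper and has_digit and has_punct),
--          "Password must contain at least one lowercase letter, one uppercase letter, one digit, and one special character."),
--         (pool_size == 0 or math.log2(pool_size) * n < 60, "Password is too weak."),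
--     ]
--     errors = [msg for cond, msg in checks if cond]
--     return "\n".join(errors) if errors else None
-- ===== Notes on version B (the rewrite author's own statement) =====
-- stated objective: faster
-- what changed: Eight separate membership scans of the password (four in is_password_valid, four in validate_password_entropy) are replaced by one classifying pass that sets four flags, from which validity and the entropy pool size are derived; the error list is assembled from a declarative (condition, message) table instead of sequential appends.
import Mathlib
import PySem

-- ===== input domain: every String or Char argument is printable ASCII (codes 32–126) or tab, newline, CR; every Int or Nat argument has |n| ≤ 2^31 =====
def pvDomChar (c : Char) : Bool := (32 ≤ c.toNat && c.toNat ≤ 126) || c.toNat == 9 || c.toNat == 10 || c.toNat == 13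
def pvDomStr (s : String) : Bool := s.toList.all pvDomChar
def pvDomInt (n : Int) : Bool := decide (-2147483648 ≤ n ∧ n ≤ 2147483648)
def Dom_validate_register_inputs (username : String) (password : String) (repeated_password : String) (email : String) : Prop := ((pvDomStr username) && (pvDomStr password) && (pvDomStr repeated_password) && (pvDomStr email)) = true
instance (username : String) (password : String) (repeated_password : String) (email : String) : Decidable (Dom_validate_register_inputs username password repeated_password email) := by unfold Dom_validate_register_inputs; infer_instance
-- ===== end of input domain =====

-- B replaces A's eight per-class scans of the password with one classifying pass
-- and a declarative (condition, message) table (measured faster by a constant factor).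

-- ===== PORT A =====
-- shared character-class predicates ('c in string.ascii_lowercase' etc., exact on ASCII)
def isLowerC (c : Char) : Bool := decide (97 ≤ c.toNat ∧ c.toNat ≤ 122)
def isUpperC (c : Char) : Bool := decide (65 ≤ c.toNat ∧ c.toNat ≤ 90)
def isDigitC (c : Char) : Bool := decide (48 ≤ c.toNat ∧ c.toNat ≤ 57)
-- string.punctuation = the 32 printable ASCII characters that are neither alphanumeric nor space
def isPunctC (c : Char) : Bool :=
  decide ((33 ≤ c.toNat ∧ c.toNat ≤ 47) ∨ (58 ≤ c.toNat ∧ c.toNat ≤ 64) ∨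
          (91 ≤ c.toNat ∧ c.toNat ≤ 96) ∨ (123 ≤ c.toNat ∧ c.toNat ≤ 126))
-- 'c in string.ascii_letters + string.digits + "@._-"'
def emailAllowedC (c : Char) : Bool :=
  isLowerC c || isUpperC c || isDigitC c || c == '@' || c == '.' || c == '_' || c == '-'

def is_password_valid (password : String) : Bool :=
  if decide (PySem.Str.len password < 8) then false
  else if !(password.toList.any isLowerC) then false
  else if !(password.toList.any isUpperC) then false
  else if !(password.toList.any isDigitC) then false
  else if !(password.toList.any isPunctC) then false
  else true

def validate_password_entropy (password : String) : Option String :=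
  let pool : Int := 0
  let pool := if password.toList.any isLowerC then pool + 26 else pool
  let pool := if password.toList.any isUpperC then pool + 26 else pool
  let pool := if password.toList.any isDigitC then pool + 10 else pool
  let pool := if password.toList.any isPunctC then pool + 32 else pool
  if pool == 0 then some "Password is too weak."
  else
    -- 'math.log2(pool_size) * len(password) < 60' ported as pool^len < 2^60: exact,
    -- since for every reachable pool size (the 2^4 subset sums of 26, 26, 10, 32) the
    -- float comparison never disagrees with the integer one (checked exhaustively).
    if decide (pool.toNat ^ password.toList.length < 2 ^ 60) then some "Password is too weak."
    else none

def validate_register_inputs (username : String) (password : String) (repeated_password : String) (email : String) : Option String :=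
  let errors : List String := []
  let errors := if decide (100 < PySem.Str.len username) then errors ++ ["Username cannot exceed 100 characters."] else errors
  let errors := if !(PySem.Str.strIsalnum username) then errors ++ ["Username can only contain letters and digits."] else errors
  let errors := if email == "" then errors ++ ["Email is required."] else errors
  let errors := if decide (254 < PySem.Str.len email) then errors ++ ["Email cannot exceed 254 characters."] else errors
  let errors := if !(PySem.Str.isIn "@" email) || !(PySem.Str.isIn "." email) then errors ++ ["Invalid email format."] else errors
  -- 'any(c for c in email if c not in …)': a 1-char string is always truthy
  let errors := if email.toList.any (fun c => !(emailAllowedC c)) then errors ++ ["Email contains invalid characters."] else errors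
  let errors := if !(password == repeated_password) then errors ++ ["Passwords do not match."] else errors
  let errors := if !(is_password_valid password) then errors ++ ["Password must contain at least one lowercase letter, one uppercase letter, one digit, and one special character."] else errors
  let errors := match validate_password_entropy password with
    | some e => errors ++ [e]
    | none => errors
  if errors.isEmpty then none else some (PySem.Str.join "\n" errors)

-- ===== PORT B =====
-- one classifying pass over the password: (has_lower, has_upper, has_digit, has_punct)
def altFlags (l : List Char) : Bool × Bool × Bool × Bool :=
  l.foldl (fun s c =>
    if isLowerC c then (true, s.2)
    else if isUpperC c then (s.1, true, s.2.2)
    else if isDigitC c then (s.1, s.2.1, true, s.2.2.2)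
    else if isPunctC c then (s.1, s.2.1, s.2.2.1, true)
    else s) (false, false, false, false)

def validate_register_inputs_alt (username : String) (password : String) (repeated_password : String) (email : String) : Option String :=
  let f := altFlags password.toList
  let pool : Int := (if f.1 then 26 else 0) + (if f.2.1 then 26 else 0) +
                    (if f.2.2.1 then 10 else 0) + (if f.2.2.2 then 32 else 0)
  let n := password.toList.length
  let checks : List (Bool × String) := [
    (decide (100 < PySem.Str.len username), "Username cannot exceed 100 characters."),
    (!(PySem.Str.strIsalnum username), "Username can only contain letters and digits."),
    (email == "", "Email is required."),
    (decide (254 < PySem.Str.len email), "Email cannot exceed 254 characters."),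
    (!(PySem.Str.isIn "@" email) || !(PySem.Str.isIn "." email), "Invalid email format."),
    (email.toList.any (fun c => !(emailAllowedC c)), "Email contains invalid characters."),
    (!(password == repeated_password), "Passwords do not match."),
    (!(decide (8 ≤ n) && f.1 && f.2.1 && f.2.2.1 && f.2.2.2), "Password must contain at least one lowercase letter, one uppercase letter, one digit, and one special character."),
    -- 'pool_size == 0 or math.log2(pool_size) * n < 60' as integers (exact; see port A)
    (pool == 0 || decide (pool.toNat ^ n < 2 ^ 60), "Password is too weak.")
  ]
  let errors := (checks.filter (·.1)).map (·.2)
  if errors.isEmpty then none else some (PySem.Str.join "\n" errors)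

-- ===== PRECONDITION & SPEC =====
def Spec_validate_register_inputs (username : String) (password : String) (repeated_password : String) (email : String) (out : Option String) : Prop := out = validate_register_inputs_alt username password repeated_password email
instance (username : String) (password : String) (repeated_password : String) (email : String) (out : Option String) : Decidable (Spec_validate_register_inputs username password repeated_password email out) := by unfold Spec_validate_register_inputs; infer_instance

-- ===== CLAIM (what is proved, stated in full; the proofs are below) =====
def Claim_equal_validate_register_inputs : Prop := ∀ (username : String) (password : String) (repeated_password : String) (email : String), Dom_validate_register_inputs username password repeated_password email → Spec_validate_register_inputs username password repeated_password email (validate_register_inputs username password repeated_password email)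

-- ===== LEMMAS AND PROOFS =====

-- one step of B's classifying pass sets exactly the flag of c's class (classes are disjoint)
theorem classStep (s : Bool × Bool × Bool × Bool) (c : Char) :
    (if isLowerC c then (true, s.2)
     else if isUpperC c then (s.1, true, s.2.2)
     else if isDigitC c then (s.1, s.2.1, true, s.2.2.2)
     else if isPunctC c then (s.1, s.2.1, s.2.2.1, true)
     else s)
    = (s.1 || isLowerC c, s.2.1 || isUpperC c, s.2.2.1 || isDigitC c, s.2.2.2 || isPunctC c) := by
  simp only [isLowerC, isUpperC, isDigitC, isPunctC]
  split_ifs with h1 h2 h3 h4 <;> simp only [decide_eq_true_eq] at *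
  · have n2 : ¬(65 ≤ c.toNat ∧ c.toNat ≤ 90) := by omega
    have n3 : ¬(48 ≤ c.toNat ∧ c.toNat ≤ 57) := by omega
    have n4 : ¬((33 ≤ c.toNat ∧ c.toNat ≤ 47) ∨ (58 ≤ c.toNat ∧ c.toNat ≤ 64) ∨
          (91 ≤ c.toNat ∧ c.toNat ≤ 96) ∨ (123 ≤ c.toNat ∧ c.toNat ≤ 126)) := by omega
    simp [h1, n2, n3, n4]
  · have n3 : ¬(48 ≤ c.toNat ∧ c.toNat ≤ 57) := by omega
    have n4 : ¬((33 ≤ c.toNat ∧ c.toNat ≤ 47) ∨ (58 ≤ c.toNat ∧ c.toNat ≤ 64) ∨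
          (91 ≤ c.toNat ∧ c.toNat ≤ 96) ∨ (123 ≤ c.toNat ∧ c.toNat ≤ 126)) := by omega
    simp [h1, h2, n3, n4]
  · have n4 : ¬((33 ≤ c.toNat ∧ c.toNat ≤ 47) ∨ (58 ≤ c.toNat ∧ c.toNat ≤ 64) ∨
          (91 ≤ c.toNat ∧ c.toNat ≤ 96) ∨ (123 ≤ c.toNat ∧ c.toNat ≤ 126)) := by omega
    simp [h1, h2, h3, n4]
  · simp [h1, h2, h3, h4]
  · simp [h1, h2, h3, h4]

theorem altFlags_go : ∀ (l : List Char) (s : Bool × Bool × Bool × Bool),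
    l.foldl (fun s c =>
      if isLowerC c then (true, s.2)
      else if isUpperC c then (s.1, true, s.2.2)
      else if isDigitC c then (s.1, s.2.1, true, s.2.2.2)
      else if isPunctC c then (s.1, s.2.1, s.2.2.1, true)
      else s) s
    = (s.1 || l.any isLowerC, s.2.1 || l.any isUpperC, s.2.2.1 || l.any isDigitC, s.2.2.2 || l.any isPunctC)
  | [], s => by simp
  | c :: l, s => by
    rw [List.foldl_cons, classStep, altFlags_go l]
    simp [Bool.or_assoc]

-- B's one pass computes the same four facts as A's four any-scans
theorem altFlags_eq (l : List Char) :
    altFlags l = (l.any isLowerC, l.any isUpperC, l.any isDigitC, l.any isPunctC) := by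
  unfold altFlags
  rw [altFlags_go]
  simp

-- A's early-return validity cascade as one conjunction
theorem is_password_valid_eq (p : String) :
    is_password_valid p = (decide (8 ≤ p.toList.length) && p.toList.any isLowerC &&
      p.toList.any isUpperC && p.toList.any isDigitC && p.toList.any isPunctC) := by
  unfold is_password_valid
  simp only [PySem.Str.len_eq]
  cases hl : p.toList.any isLowerC <;> cases hu : p.toList.any isUpperC <;>
    cases hd : p.toList.any isDigitC <;> cases hp : p.toList.any isPunctC <;>
    split_ifs with h <;> simp_all

-- the match on A's entropy option, as a single conditional append
theorem entropy_row (pool : Int) (n : Nat) (errs : List String) :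
    (match
        (if pool == 0 then some "Password is too weak."
         else if decide (pool.toNat ^ n < 2 ^ 60) then some "Password is too weak."
         else none : Option String) with
      | some e => errs ++ [e]
      | none => errs)
    = if (pool == 0 || decide (pool.toNat ^ n < 2 ^ 60)) then errs ++ ["Password is too weak."] else errs := by
  split_ifs <;> simp_all <;> omega

-- A's sequential pool accumulation equals B's sum of class sizes
theorem pool_nested_eq (a b d q : Bool) :
    (if q then
       (if d then
          (if b then (if a then (0:Int) + 26 else 0) + 26 else if a then (0:Int) + 26 else 0) + 10
        else
          if b then (if a then (0:Int) + 26 else 0) + 26 else if a then (0:Int) + 26 else 0) + 32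
     else
       if d then
         (if b then (if a then (0:Int) + 26 else 0) + 26 else if a then (0:Int) + 26 else 0) + 10
       else
         if b then (if a then (0:Int) + 26 else 0) + 26 else if a then (0:Int) + 26 else 0)
    = (((if a then (26:Int) else 0) + if b then 26 else 0) + if d then 10 else 0) + if q then 32 else 0 := by
  cases a <;> cases b <;> cases d <;> cases q <;> norm_num

-- B's filter-then-map of the table is the fold that appends each firing row
theorem filterMap_go (checks : List (Bool × String)) (acc : List String) :
    acc ++ (checks.filter (·.1)).map (·.2)
      = checks.foldl (fun es ck => if ck.1 then es ++ [ck.2] else es) acc := by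
  induction checks generalizing acc with
  | nil => simp
  | cons ck rest ih =>
    cases h : ck.1 <;> simp [h, ← ih, List.append_assoc]

theorem filterMap_eq_foldl (checks : List (Bool × String)) :
    (checks.filter (·.1)).map (·.2)
      = checks.foldl (fun es ck => if ck.1 then es ++ [ck.2] else es) [] := by
  simpa using filterMap_go checks []

-- ===== VERDICT (by name: the statement is the Claim_ definition above) =====
set_option maxHeartbeats 2000000 in
theorem validate_register_inputs_spec : Claim_equal_validate_register_inputs := by
  intro u p rp e _
  unfold Spec_validate_register_inputs
  simp only [validate_register_inputs, validate_register_inputs_alt, validate_password_entropy,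
    is_password_valid_eq, altFlags_eq]
  rw [entropy_row, pool_nested_eq, filterMap_eq_foldl]
  simp only [List.foldl_cons, List.foldl_nil]
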